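-- pv_equiv track=rewrite | github.com/SenOfGray/Coding-Projects-Python- | ultimateTODO.py | checkItem
-- ===== SOURCE A (Python) =====
-- def checkIfListEmpty(todoList):
--     """This function checks if there are any entries in the Dictionary of Lists data structure.
--
--     :param Dictionary of Lists todoList: A dictionary whose keys contain the various categories the user can access. The values are lists the user can modify.
--     :return Boolean: If there is at least one item in the data structure, return False - it is not empty. Otherwise return True.
--     """
--     if (len(todoList["backlog"]) > 0 or
--         len(todoList["todo"]) > 0 or
--         len(todoList["in_progress"]) > 0 or
--         len(todoList["in_review"]) > 0 or
--         len(todoList["done"]) > 0):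
--         return False
--     return True
--
-- def checkItem(item, todoList):
--     """This function iterates through all the keys in the dictionary, and checks each list to see if a key is present.
--
--     :param String item: The String to search for in each list.
--     :param Dictionary of Lists todoList: A dictionary whose keys contain the various categories the user can access. The values are lists the user can modify.
--     :return Boolean, String, Integer: This function returns True/ False depending on whether the item was found, the String of the keyName, and the index in the list where the item was found.
--     """
--     itemFound = False
--     keyName = ""
--     index = -1
--     endEarly = checkIfListEmpty(todoList)
--     if endEarly:
--         return itemFound, keyName, index
--     for ki in range(len(todoList)):
--         tempList = list(todoList.values())[ki]
--         for valU in range(len(tempList)):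
--             if tempList[valU] == item:
--                 itemFound = True
--                 keyName = list(todoList.keys())[ki]
--                 index = valU
--
--
--     # TODO: Iterate through all the keys in the dictionary and check each list of each key to
--     # see if an item is present. If it is, set itemFound to be 'True.' Then, set the keyName variable
--     # to the key where the item was found, and the index in the list where the item was found.
--     # If the item is not found in any of the lists in the dictionary, keep the default values above.
--     # Return the itemFound boolean, the keyName string, and the index integer (1 pt.)
--
--     return itemFound, keyName, index
-- ===== SOURCE B (Python) =====
-- def checkItem(item, todoList):
--     # Early-terminating reverse search: the last forward occurrence is the
--     # first occurrence when scanning keys and lists back-to-front.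
--     if not any(todoList[k] for k in ("backlog", "todo", "in_progress", "in_review", "done")):
--         return False, "", -1
--     for key, lst in reversed(list(todoList.items())):
--         for i in range(len(lst) - 1, -1, -1):
--             if lst[i] == item:
--                 return True, key, i
--     return False, "", -1
-- ===== Notes on version B (the rewrite author's own statement) =====
-- stated objective: alternative
-- what changed: Replaces A's exhaustive forward double scan that overwrites the result on every match with an early-terminating reverse search (iterate keys and lists back-to-front, return the first match, which is A's last match); the empty-check and its behaviour are kept.
import Mathlib
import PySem

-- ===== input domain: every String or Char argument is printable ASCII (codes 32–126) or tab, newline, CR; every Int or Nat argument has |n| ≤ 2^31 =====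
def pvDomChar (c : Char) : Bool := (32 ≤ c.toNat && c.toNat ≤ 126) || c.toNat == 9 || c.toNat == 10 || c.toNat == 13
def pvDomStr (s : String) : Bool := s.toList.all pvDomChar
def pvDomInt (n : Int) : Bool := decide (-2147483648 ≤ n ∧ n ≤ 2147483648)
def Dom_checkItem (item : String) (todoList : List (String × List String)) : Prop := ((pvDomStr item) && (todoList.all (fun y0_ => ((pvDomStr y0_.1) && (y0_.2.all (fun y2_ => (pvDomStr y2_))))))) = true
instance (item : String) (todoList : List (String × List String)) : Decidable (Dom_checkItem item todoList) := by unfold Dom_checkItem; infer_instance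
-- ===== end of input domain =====

-- B replaces A's exhaustive forward overwrite-last double scan by an early-terminating
-- reverse search (first match scanning keys and lists back-to-front); objective: alternative.

-- shared primitive: Python's todoList[k] lookup on the association list (first match)
def pvLookupD (todoList : List (String × List String)) (k : String) : List String :=
  match todoList.find? (fun p => p.1 == k) with
  | some p => p.2
  | none => []

-- ===== PORT A =====
def checkIfListEmpty (todoList : List (String × List String)) : Bool :=
  if ((pvLookupD todoList "backlog").length > 0 ||
      (pvLookupD todoList "todo").length > 0 ||
      (pvLookupD todoList "in_progress").length > 0 ||
      (pvLookupD todoList "in_review").length > 0 ||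
      (pvLookupD todoList "done").length > 0) then false else true

def checkItem (item : String) (todoList : List (String × List String)) : Bool × String × Int :=
  let itemFound : Bool := false
  let keyName : String := ""
  let index : Int := -1
  let endEarly := checkIfListEmpty todoList
  if endEarly then (itemFound, keyName, index)
  else
    (List.range todoList.length).foldl
      (fun st ki =>
        let tempList := (todoList.map Prod.snd).getD ki []
        (List.range tempList.length).foldl
          (fun st valU =>
            if tempList.getD valU "" == item then
              (true, (todoList.map Prod.fst).getD ki "", (valU : Int))
            else st)
          st)
      (itemFound, keyName, index)

-- ===== PORT B =====
-- B's reverse scan: first key (scanning back-to-front) whose list contains item,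
-- with the last index of item in that list (first match of the inner reverse scan).
def revSearch (item : String) : List (String × List String) → Bool × String × Int
  | [] => (false, "", -1)
  | (k, lst) :: rest =>
    match lst.reverse.findIdx? (fun s => s == item) with
    | some j => (true, k, ((lst.length - 1 - j : Nat) : Int))
    | none => revSearch item rest

def checkItem_alt (item : String) (todoList : List (String × List String)) : Bool × String × Int :=
  if !((!(pvLookupD todoList "backlog").isEmpty) ||
       (!(pvLookupD todoList "todo").isEmpty) ||
       (!(pvLookupD todoList "in_progress").isEmpty) ||
       (!(pvLookupD todoList "in_review").isEmpty) ||
       (!(pvLookupD todoList "done").isEmpty)) then (false, "", -1)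
  else revSearch item todoList.reverse

-- ===== PRECONDITION & SPEC =====
-- Pre_ excludes exactly the inputs on which Python A raises KeyError: the empty-check's
-- short-circuited `or` chain reaches a category key that is missing from the dictionary.
def Pre_checkItem (item : String) (todoList : List (String × List String)) : Prop :=
  "backlog" ∈ todoList.map Prod.fst ∧
    (pvLookupD todoList "backlog" ≠ [] ∨
      ("todo" ∈ todoList.map Prod.fst ∧
        (pvLookupD todoList "todo" ≠ [] ∨
          ("in_progress" ∈ todoList.map Prod.fst ∧
            (pvLookupD todoList "in_progress" ≠ [] ∨
              ("in_review" ∈ todoList.map Prod.fst ∧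
                (pvLookupD todoList "in_review" ≠ [] ∨
                  "done" ∈ todoList.map Prod.fst)))))))

instance (item : String) (todoList : List (String × List String)) : Decidable (Pre_checkItem item todoList) := by unfold Pre_checkItem; infer_instance

def pvWitness_checkItem : String × (List (String × List String)) :=
  ("x", [("backlog", ["x"]), ("todo", []), ("in_progress", ["y"]), ("in_review", []), ("done", [])])

def Spec_checkItem (item : String) (todoList : List (String × List String)) (out : Bool × String × Int) : Prop := out = checkItem_alt item todoList
instance (item : String) (todoList : List (String × List String)) (out : Bool × String × Int) : Decidable (Spec_checkItem item todoList out) := by unfold Spec_checkItem; infer_instance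

-- ===== CLAIM (what is proved, stated in full; the proofs are below) =====
def Claim_equal_checkItem : Prop := ∀ (item : String) (todoList : List (String × List String)), Dom_checkItem item todoList → Pre_checkItem item todoList → Spec_checkItem item todoList (checkItem item todoList)

-- ===== LEMMAS AND PROOFS =====

-- A's inner loop over one list, as a named function (proof-side only)
def innerF (item k : String) (lst : List String) (st : Bool × String × Int) : Bool × String × Int :=
  (List.range lst.length).foldl
    (fun st valU => if lst.getD valU "" == item then (true, k, (valU : Int)) else st) st

-- A's inner overwrite-last loop computes the LAST index of item (phrased via reverse findIdx?)
lemma innerF_eq (item k : String) (lst : List String) :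
    ∀ st, innerF item k lst st =
      match lst.reverse.findIdx? (fun s => s == item) with
      | some j => (true, k, ((lst.length - 1 - j : Nat) : Int))
      | none => st := by
  induction lst using List.reverseRecOn with
  | nil => intro st; simp [innerF]
  | append_singleton M a ih =>
    intro st
    have hcongr :
        (List.range M.length).foldl
          (fun st valU => if (M ++ [a]).getD valU "" == item then (true, k, (valU : Int)) else st) st
        = innerF item k M st := by
      unfold innerF
      apply PySem.List.foldl_congr_mem'
      intro i hi st'
      have hlt : i < M.length := List.mem_range.mp hi
      rw [List.getD_append _ _ _ _ hlt]
    have hlast : (M ++ [a]).getD M.length "" = a := by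
      simp [List.getD]
    unfold innerF
    rw [List.length_append, List.length_singleton, List.range_succ, List.foldl_append]
    simp only [List.foldl_cons, List.foldl_nil]
    rw [hcongr, ih st, hlast]
    have hrev : (M ++ [a]).reverse = a :: M.reverse := by
      rw [List.reverse_append]; rfl
    rw [hrev, List.findIdx?_cons]
    by_cases ha : a == item
    · simp [ha]
    · rw [if_neg (by simp_all), if_neg (by simp_all)]
      cases hfi : M.reverse.findIdx? (fun s => s == item) with
      | none => simp
      | some j =>
        simp only [Option.map_some]
        simp
        omega

-- A's outer range-indexed loop equals the structural fold over the pairs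
lemma outerA_eq_fold (item : String) (L : List (String × List String)) :
    ∀ st, (List.range L.length).foldl
      (fun st ki =>
        let tempList := (L.map Prod.snd).getD ki []
        (List.range tempList.length).foldl
          (fun st valU =>
            if tempList.getD valU "" == item then (true, (L.map Prod.fst).getD ki "", (valU : Int)) else st)
          st) st
    = L.foldl (fun st p => innerF item p.1 p.2 st) st := by
  induction L using List.reverseRecOn with
  | nil => intro st; simp
  | append_singleton M p ih =>
    intro st
    rw [List.length_append, List.length_singleton, List.range_succ, List.foldl_append,
        List.foldl_append]
    simp only [List.foldl_cons, List.foldl_nil]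
    have hcongr :
        (List.range M.length).foldl
          (fun st ki =>
            let tempList := ((M ++ [p]).map Prod.snd).getD ki []
            (List.range tempList.length).foldl
              (fun st valU =>
                if tempList.getD valU "" == item then (true, ((M ++ [p]).map Prod.fst).getD ki "", (valU : Int)) else st)
              st) st
        = (List.range M.length).foldl
          (fun st ki =>
            let tempList := (M.map Prod.snd).getD ki []
            (List.range tempList.length).foldl
              (fun st valU =>
                if tempList.getD valU "" == item then (true, (M.map Prod.fst).getD ki "", (valU : Int)) else st)
              st) st := by
      apply PySem.List.foldl_congr_mem'
      intro i hi st'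
      have hlt : i < M.length := List.mem_range.mp hi
      have h1 : ((M ++ [p]).map Prod.snd).getD i [] = (M.map Prod.snd).getD i [] := by
        rw [List.map_append, List.getD_append _ _ _ _ (by simpa using hlt)]
      have h2 : ((M ++ [p]).map Prod.fst).getD i "" = (M.map Prod.fst).getD i "" := by
        rw [List.map_append, List.getD_append _ _ _ _ (by simpa using hlt)]
      simp only [h1, h2]
    rw [hcongr, ih st]
    have h1 : ((M ++ [p]).map Prod.snd).getD M.length [] = p.2 := by
      simp [List.map_append, List.getD]
    have h2 : ((M ++ [p]).map Prod.fst).getD M.length "" = p.1 := by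
      simp [List.map_append, List.getD]
    simp only [h1, h2, innerF]

-- proof-side: the first hit of the reverse scan, as an Option
def hitR (item : String) : List (String × List String) → Option (Bool × String × Int)
  | [] => none
  | (k, lst) :: rest =>
    match lst.reverse.findIdx? (fun s => s == item) with
    | some j => some (true, k, ((lst.length - 1 - j : Nat) : Int))
    | none => hitR item rest

lemma revSearch_eq_hitR (item : String) (L : List (String × List String)) :
    revSearch item L = (hitR item L).getD (false, "", -1) := by
  induction L with
  | nil => rfl
  | cons p rest ih =>
    cases p with
    | mk k lst =>
      cases hfind : lst.reverse.findIdx? (fun s => s == item) with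
      | some j => simp only [revSearch, hitR, hfind, Option.getD_some]
      | none => simp only [revSearch, hitR, hfind]; exact ih

-- the overwrite-last fold over L returns the first hit of the reverse scan (or the start state)
lemma fold_eq_hitR (item : String) (L : List (String × List String)) :
    ∀ st, L.foldl (fun st p => innerF item p.1 p.2 st) st = (hitR item L.reverse).getD st := by
  induction L using List.reverseRecOn with
  | nil => intro st; simp [hitR]
  | append_singleton M p ih =>
    intro st
    rw [List.foldl_append]
    simp only [List.foldl_cons, List.foldl_nil]
    rw [innerF_eq item p.1 p.2]
    have hrev : (M ++ [p]).reverse = p :: M.reverse := by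
      rw [List.reverse_append]; rfl
    rw [hrev]
    cases p with
    | mk k lst =>
      cases hfind : lst.reverse.findIdx? (fun s => s == item) with
      | some j => simp [hitR, hfind]
      | none => simp only [hitR, hfind]; exact ih st

-- the two empty-checks are opposite booleans
lemma emptycheck_eq (todoList : List (String × List String)) :
    checkIfListEmpty todoList
      = !((!(pvLookupD todoList "backlog").isEmpty) ||
          (!(pvLookupD todoList "todo").isEmpty) ||
          (!(pvLookupD todoList "in_progress").isEmpty) ||
          (!(pvLookupD todoList "in_review").isEmpty) ||
          (!(pvLookupD todoList "done").isEmpty)) := by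
  unfold checkIfListEmpty
  have h : ∀ l : List String, (decide (l.length > 0)) = !l.isEmpty := by
    intro l; cases l <;> simp
  simp only [h]
  split_ifs with hc
  · simp only [hc]; rfl
  · simp only [Bool.not_eq_true] at hc
    simp only [hc]; rfl

-- ===== VERDICT (by name: the statement is the Claim_ definition above) =====
theorem checkItem_spec : Claim_equal_checkItem := by
  intro item todoList _hdom _hpre
  unfold Spec_checkItem checkItem checkItem_alt
  rw [emptycheck_eq]
  cases h : (!((!(pvLookupD todoList "backlog").isEmpty) ||
          (!(pvLookupD todoList "todo").isEmpty) ||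
          (!(pvLookupD todoList "in_progress").isEmpty) ||
          (!(pvLookupD todoList "in_review").isEmpty) ||
          (!(pvLookupD todoList "done").isEmpty))) with
  | true => simp
  | false =>
    simp only [if_false, Bool.false_eq_true]
    rw [outerA_eq_fold, fold_eq_hitR, revSearch_eq_hitR]
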